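-- pv_equiv track=rewrite | github.com/RachelCmy/pinf_smoke | run_pinf_helpers.py | _get_min_size
-- ===== SOURCE A (Python) =====
-- def _get_min_size(layers):
--     last_layer = max(layers)
--     min_size = 1
--     for layer in [4, 9, 18, 27, 36]:
--         if last_layer < layer:
--             break
--         min_size *= 2
--     return min_size
-- ===== SOURCE B (Python) =====
-- import bisect
--
-- _THRESHOLDS = [4, 9, 18, 27, 36]
--
-- def _get_min_size(layers):
--     last_layer = max(layers)
--     count = bisect.bisect_right(_THRESHOLDS, last_layer)
--     return 2 ** count
-- ===== Notes on version B (the rewrite author's own statement) =====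
-- stated objective: simpler
-- what changed: Replaces the sequential scan-with-break that doubles an accumulator with a binary search (bisect_right) into the sorted threshold table followed by a single closed-form 2**count.
import Mathlib
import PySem

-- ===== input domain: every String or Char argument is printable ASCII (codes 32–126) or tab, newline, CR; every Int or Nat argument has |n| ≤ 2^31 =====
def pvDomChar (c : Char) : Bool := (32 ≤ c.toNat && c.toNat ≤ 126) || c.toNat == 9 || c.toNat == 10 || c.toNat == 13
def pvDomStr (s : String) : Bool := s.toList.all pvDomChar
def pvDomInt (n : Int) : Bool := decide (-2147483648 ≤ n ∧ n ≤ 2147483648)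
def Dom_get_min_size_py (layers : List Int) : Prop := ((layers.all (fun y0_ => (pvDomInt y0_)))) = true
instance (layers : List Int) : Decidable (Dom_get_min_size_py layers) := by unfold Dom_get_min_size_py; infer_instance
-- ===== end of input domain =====

-- B replaces A's break-loop that doubles an accumulator with bisect_right on the sorted
-- threshold table plus a single 2**count (objective: simpler).


-- ===== PORT A =====
-- the for-loop with break: multiply min_size by 2 until last_layer < layer
def pvLoopA (last : Int) : List Int → Int → Int
  | [], acc => acc
  | l :: ls, acc => if last < l then acc else pvLoopA last ls (acc * 2)

def get_min_size_py (layers : List Int) : Int :=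
  match PySem.List.max? layers (fun x => x) with
  | none => 0   -- Python raises ValueError here; excluded by Pre_
  | some last => pvLoopA last [4, 9, 18, 27, 36] 1

-- ===== PORT B =====
-- bisect.bisect_right on the sorted threshold table (standard-library binary search;
-- the while lo < hi loop is ported with a fuel counter, fuel = hi - lo iterations suffice)
def pvBisectRight (a : List Int) (x : Int) : Nat → Nat → Nat → Nat
  | 0, lo, _hi => lo
  | fuel + 1, lo, hi =>
    if lo < hi then
      if x < a.getD ((lo + hi) / 2) 0 then pvBisectRight a x fuel lo ((lo + hi) / 2)
      else pvBisectRight a x fuel ((lo + hi) / 2 + 1) hi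
    else lo

def get_min_size_py_alt (layers : List Int) : Int :=
  match PySem.List.max? layers (fun x => x) with
  | none => 0   -- Python raises ValueError here; excluded by Pre_
  | some last => (2 : Int) ^ pvBisectRight [4, 9, 18, 27, 36] last 5 0 5

-- ===== PRECONDITION & SPEC =====
-- Pre_ excludes only the empty list, on which Python's max (in both A and B) raises ValueError.
def Pre_get_min_size_py (layers : List Int) : Prop := layers ≠ []
instance (layers : List Int) : Decidable (Pre_get_min_size_py layers) := by unfold Pre_get_min_size_py; infer_instance
def pvWitness_get_min_size_py : List Int := ([10, 4])
def Spec_get_min_size_py (layers : List Int) (out : Int) : Prop := out = get_min_size_py_alt layers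
instance (layers : List Int) (out : Int) : Decidable (Spec_get_min_size_py layers out) := by unfold Spec_get_min_size_py; infer_instance

-- ===== CLAIM (what is proved, stated in full; the proofs are below) =====
def Claim_equal_get_min_size_py : Prop := ∀ (layers : List Int), Dom_get_min_size_py layers → Pre_get_min_size_py layers → Spec_get_min_size_py layers (get_min_size_py layers)

-- ===== LEMMAS AND PROOFS =====
lemma pv_b0 (last : Int) (h : last < 4) : pvBisectRight [4, 9, 18, 27, 36] last 5 0 5 = 0 := by
  norm_num [pvBisectRight, h, show last < 9 by omega, show last < 18 by omega]

lemma pv_b1 (last : Int) (h4 : ¬ last < 4) (h : last < 9) : pvBisectRight [4, 9, 18, 27, 36] last 5 0 5 = 1 := by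
  norm_num [pvBisectRight, h4, h, show last < 18 by omega]

lemma pv_b2 (last : Int) (h9 : ¬ last < 9) (h : last < 18) : pvBisectRight [4, 9, 18, 27, 36] last 5 0 5 = 2 := by
  norm_num [pvBisectRight, h9, h]

lemma pv_b3 (last : Int) (h18 : ¬ last < 18) (h : last < 27) : pvBisectRight [4, 9, 18, 27, 36] last 5 0 5 = 3 := by
  norm_num [pvBisectRight, h18, h, show last < 36 by omega]

lemma pv_b4 (last : Int) (h27 : ¬ last < 27) (h : last < 36) : pvBisectRight [4, 9, 18, 27, 36] last 5 0 5 = 4 := by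
  norm_num [pvBisectRight, h27, h, show ¬ last < 18 by omega]

lemma pv_b5 (last : Int) (h : ¬ last < 36) : pvBisectRight [4, 9, 18, 27, 36] last 5 0 5 = 5 := by
  norm_num [pvBisectRight, h, show ¬ last < 18 by omega, show ¬ last < 27 by omega]

lemma pv_core (last : Int) :
    pvLoopA last [4, 9, 18, 27, 36] 1 = (2 : Int) ^ pvBisectRight [4, 9, 18, 27, 36] last 5 0 5 := by
  by_cases h4 : last < 4
  · rw [pv_b0 last h4]; simp [pvLoopA, h4]
  · by_cases h9 : last < 9
    · rw [pv_b1 last h4 h9]; simp [pvLoopA, h4, h9]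
    · by_cases h18 : last < 18
      · rw [pv_b2 last h9 h18]; simp [pvLoopA, h4, h9, h18]
      · by_cases h27 : last < 27
        · rw [pv_b3 last h18 h27]; simp [pvLoopA, h4, h9, h18, h27]
        · by_cases h36 : last < 36
          · rw [pv_b4 last h27 h36]; simp [pvLoopA, h4, h9, h18, h27, h36]
          · rw [pv_b5 last h36]; simp [pvLoopA, h4, h9, h18, h27, h36]

-- ===== VERDICT (by name: the statement is the Claim_ definition above) =====
theorem get_min_size_py_spec : Claim_equal_get_min_size_py := by
  intro layers _ _
  unfold Spec_get_min_size_py get_min_size_py get_min_size_py_alt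
  cases h : PySem.List.max? layers (fun x => x) with
  | none => rfl
  | some last => exact pv_core last
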